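-- pv_equiv track=rewrite | github.com/AnastasiosMargaritis/MSc | Cryptography/Semester Project/Exercise 3/vigenere.py | break_ciphers
-- ===== SOURCE A (Python) =====
-- def break_ciphers(cipher, key_length):
--     dict = {}
--
--     for i in range(0, key_length):
--
--         counter = i;
--         chars = []
--         st = ""
--
--         while(counter < len(cipher)):
--             chars.append(cipher[counter])
--             counter += key_length
--
--
--         dict[i] = st.join(chars)
--
--     return dict
-- ===== SOURCE B (Python) =====
-- def break_ciphers(cipher, key_length):
--     buckets = {i: [] for i in range(key_length)}
--     if key_length > 0:
--         for idx, ch in enumerate(cipher):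
--             buckets[idx % key_length].append(ch)
--     return {i: "".join(buckets[i]) for i in buckets}
-- ===== Notes on version B (the rewrite author's own statement) =====
-- stated objective: alternative
-- what changed: Replaces key_length strided gather passes over the cipher (one inner while-loop per coset) by a single scatter pass with enumerate that appends each character to buckets[idx % key_length], inverting the loop nesting.
import Mathlib
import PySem

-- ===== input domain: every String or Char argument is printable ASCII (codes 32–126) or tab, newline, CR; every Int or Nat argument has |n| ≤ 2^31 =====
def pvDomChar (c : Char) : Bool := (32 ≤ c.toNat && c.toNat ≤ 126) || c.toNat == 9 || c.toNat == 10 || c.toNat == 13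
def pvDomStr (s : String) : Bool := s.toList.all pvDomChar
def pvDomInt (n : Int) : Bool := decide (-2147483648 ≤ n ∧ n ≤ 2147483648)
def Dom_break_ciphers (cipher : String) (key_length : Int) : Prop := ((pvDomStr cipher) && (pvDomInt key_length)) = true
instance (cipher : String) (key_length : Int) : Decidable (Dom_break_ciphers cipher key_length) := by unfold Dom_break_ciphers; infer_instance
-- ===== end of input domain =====

-- B replaces A's key_length strided gather passes (one inner while-loop per coset) by one
-- scatter pass over enumerate(cipher) into pre-built buckets; same return value, similar cost.

-- ===== PORT A =====
-- inner loop 'while counter < len(cipher): chars.append(cipher[counter]); counter += key_length';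
-- the fuel argument only makes the recursion total: the loop is entered with key_length ≥ 1
-- and fuel > len(cipher) - counter, so the fuel is never exhausted.
def gatherA (cs : List Char) (k : Int) (counter : Int) (fuel : Nat) : List Char :=
  match fuel with
  | 0 => []
  | fuel + 1 =>
    if counter < (cs.length : Int) then
      match PySem.List.pyGet? cs counter with
      | some c => c :: gatherA cs k (counter + k) fuel
      | none => []
    else []

def break_ciphers (cipher : String) (key_length : Int) : List (Int × String) :=
  ((PySem.List.pyRange 0 key_length 1).foldl
    (fun (d : PySem.Dict Int String) i =>
      d.insert i (String.ofList (gatherA cipher.toList key_length i (cipher.toList.length + 1))))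
    PySem.Dict.empty).items

-- ===== PORT B =====
def break_ciphers_alt (cipher : String) (key_length : Int) : List (Int × String) :=
  let buckets0 : PySem.Dict Int (List Char) :=
    (PySem.List.pyRange 0 key_length 1).foldl (fun d i => d.insert i []) PySem.Dict.empty
  let buckets :=
    if 0 < key_length then
      (PySem.List.enumerate cipher.toList 0).foldl
        (fun d p => d.modify (PySem.Int.mod p.1 key_length) [] (· ++ [p.2])) buckets0
    else buckets0
  buckets.items.map (fun p => (p.1, String.ofList p.2))

-- ===== PRECONDITION & SPEC =====
def Spec_break_ciphers (cipher : String) (key_length : Int) (out : List (Int × String)) : Prop := out = break_ciphers_alt cipher key_length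
instance (cipher : String) (key_length : Int) (out : List (Int × String)) : Decidable (Spec_break_ciphers cipher key_length out) := by unfold Spec_break_ciphers; infer_instance

-- ===== CLAIM (what is proved, stated in full; the proofs are below) =====
def Claim_equal_break_ciphers : Prop := ∀ (cipher : String) (key_length : Int), Dom_break_ciphers cipher key_length → Spec_break_ciphers cipher key_length (break_ciphers cipher key_length)

-- ===== LEMMAS AND PROOFS =====

-- Set.update adds nothing when every element is already present
theorem set_update_of_subset (s : List Int) (l : List Int) (h : ∀ x ∈ l, x ∈ s) :
    PySem.Set.update s l = s := by
  induction l generalizing s with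
  | nil => simp [PySem.Set.update]
  | cons x xs ih =>
    have hx : x ∈ s := h x (by simp)
    have hadd : PySem.Set.add s x = s := by simp [PySem.Set.add, PySem.Set.contains, hx]
    simp only [PySem.Set.update, List.foldl_cons]
    rw [show List.foldl PySem.Set.add (PySem.Set.add s x) xs
          = PySem.Set.update (PySem.Set.add s x) xs from rfl, hadd]
    exact ih s (fun y hy => h y (by simp [hy]))

-- one step of the filtered-enumerate view of a coset
theorem filter_enum_split (k : Int) (hk : 0 < k) (cs : List Char) :
    ∀ (s c : Int), s ≤ c →
    ((PySem.List.enumerate cs s).filter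
        (fun p => decide (c ≤ p.1) && (PySem.Int.mod (p.1 - c) k == 0))).map (·.2) =
      match PySem.List.pyGet? cs (c - s) with
      | some x => x :: ((PySem.List.enumerate cs s).filter
          (fun p => decide (c + k ≤ p.1) && (PySem.Int.mod (p.1 - (c + k)) k == 0))).map (·.2)
      | none => [] := by
  induction cs with
  | nil => intro s c hsc; simp [PySem.List.enumerate_nil, PySem.List.pyGet?]
  | cons x xs ih =>
    intro s c hsc
    rw [PySem.List.enumerate_cons]
    have hmod0 : PySem.Int.mod 0 k = 0 := by
      rw [PySem.Int.mod_eq_emod_of_pos hk]; simp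
    rcases eq_or_lt_of_le hsc with heq | hlt
    · -- s = c : the head is kept
      subst heq
      have hget : PySem.List.pyGet? (x :: xs) (s - s) = some x := by
        rw [show s - s = (0:Int) from by ring]
        exact PySem.List.pyGet?_zero_cons x xs
      rw [hget]
      have hhead : (decide (s ≤ (s, x).1) && (PySem.Int.mod ((s, x).1 - s) k == 0)) = true := by
        simp [hmod0]
      have hhead2 : (decide (s + k ≤ (s, x).1) && (PySem.Int.mod ((s, x).1 - (s + k)) k == 0)) = false := by
        have : ¬ (s + k ≤ s) := by omega
        simp [this]
      rw [List.filter_cons, List.filter_cons, hhead, hhead2]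
      simp only [if_true]
      rw [List.map_cons]
      congr 1
      apply congrArg
      apply List.filter_congr
      intro p hp
      obtain ⟨j, hj, rfl⟩ := (PySem.List.mem_enumerate_iff xs (s + 1) p).mp hp
      simp only []
      have e2 : PySem.Int.mod ((s + 1 + (j : Int)) - (s + k)) k
          = PySem.Int.mod ((s + 1 + (j : Int)) - s) k := by
        rw [PySem.Int.mod_eq_emod_of_pos hk, PySem.Int.mod_eq_emod_of_pos hk,
          show (s + 1 + (j : Int)) - (s + k) = ((s + 1 + (j : Int)) - s) - k from by ring,
          Int.sub_emod_right]
      rw [e2]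
      by_cases hM : PySem.Int.mod ((s + 1 + (j : Int)) - s) k = 0
      · have hdvd : k ∣ (s + 1 + (j : Int)) - s := by
          rw [PySem.Int.mod_eq_emod_of_pos hk] at hM
          exact Int.dvd_of_emod_eq_zero hM
        have hge : k ≤ (s + 1 + (j : Int)) - s := Int.le_of_dvd (by omega) hdvd
        have d1 : decide (s ≤ s + 1 + (j : Int)) = true := by simp; omega
        have d2 : decide (s + k ≤ s + 1 + (j : Int)) = true := by simp; omega
        rw [d1, d2]
      · have hMf : (PySem.Int.mod ((s + 1 + (j : Int)) - s) k == 0) = false := by simpa using hM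
        rw [hMf, Bool.and_false, Bool.and_false]
    · -- s < c : the head is dropped on both sides
      have hh1 : (decide (c ≤ (s, x).1) && (PySem.Int.mod ((s, x).1 - c) k == 0)) = false := by
        have : ¬ (c ≤ s) := by omega
        simp [this]
      have hh2 : (decide (c + k ≤ (s, x).1) && (PySem.Int.mod ((s, x).1 - (c + k)) k == 0)) = false := by
        have : ¬ (c + k ≤ s) := by omega
        simp [this]
      have hget : PySem.List.pyGet? (x :: xs) (c - s) = PySem.List.pyGet? xs (c - (s + 1)) := by
        have hn : c - s = ((c - s - 1).toNat : Int) + 1 := by omega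
        rw [hn, PySem.List.pyGet?_cons_succ]
        congr 1
        omega
      rw [List.filter_cons, List.filter_cons, hh1, hh2]
      simp only [Bool.false_eq_true, if_false]
      rw [hget]
      exact ih (s + 1) c (by omega)

-- the gather loop collects exactly the characters whose index is ≡ c (mod k), as a filter of enumerate
theorem gather_eq (k : Int) (hk : 0 < k) (cs : List Char) :
    ∀ (fuel : Nat) (c : Int), 0 ≤ c → (cs.length : Int) < c + fuel →
    gatherA cs k c fuel =
      ((PySem.List.enumerate cs 0).filter
        (fun p => decide (c ≤ p.1) && (PySem.Int.mod (p.1 - c) k == 0))).map (·.2) := by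
  intro fuel
  induction fuel with
  | zero =>
    intro c hc hlen
    rw [gatherA]
    symm
    rw [List.map_eq_nil_iff, List.filter_eq_nil_iff]
    intro p hp
    obtain ⟨j, hj, rfl⟩ := (PySem.List.mem_enumerate_iff cs 0 p).mp hp
    have hnc : ¬ (c ≤ (j : Int)) := by push_cast at hlen; omega
    simp [hnc]
  | succ fuel ih =>
    intro c hc hlen
    rw [gatherA]
    by_cases hlt : c < (cs.length : Int)
    · rw [if_pos hlt]
      have hsplit := filter_enum_split k hk cs 0 c hc
      rw [show c - 0 = c from by ring] at hsplit
      rw [hsplit]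
      have hget : PySem.List.pyGet? cs c = some cs[c.toNat] := by
        rw [PySem.List.pyGet?_of_nonneg cs hc]
        exact List.getElem?_eq_getElem (by omega)
      rw [hget]
      exact congrArg (List.cons cs[c.toNat]) (ih (c + k) (by omega) (by push_cast at hlen ⊢; omega))
    · rw [if_neg hlt]
      symm
      rw [List.map_eq_nil_iff, List.filter_eq_nil_iff]
      intro p hp
      obtain ⟨j, hj, rfl⟩ := (PySem.List.mem_enumerate_iff cs 0 p).mp hp
      have hnc : ¬ (c ≤ (j : Int)) := by push_cast at hlt; omega
      simp [hnc]

-- for nonnegative indices and 0 ≤ i < k, B's residue test equals A's shifted divisibility test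
theorem mod_pred_iff (k i a : Int) (hk : 0 < k) (hi : 0 ≤ i) (hik : i < k) (ha : 0 ≤ a) :
    (PySem.Int.mod a k == i) = (decide (i ≤ a) && (PySem.Int.mod (a - i) k == 0)) := by
  rw [PySem.Int.mod_eq_emod_of_pos hk, PySem.Int.mod_eq_emod_of_pos hk]
  have hii : i % k = i := Int.emod_eq_of_lt hi hik
  have key : ((a - i) % k = 0) ↔ (a % k = i) := by
    rw [← Int.emod_eq_emod_iff_emod_sub_eq_zero]; omega
  rcases eq_or_ne (a % k) i with h | h
  · have hdvd : (a - i) % k = 0 := key.mpr h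
    have hia : i ≤ a := by
      have hq : 0 ≤ a / k := Int.ediv_nonneg ha (le_of_lt hk)
      have := Int.emod_add_mul_ediv a k
      nlinarith
    simp [h, hdvd, hia]
  · have hnd : (a - i) % k ≠ 0 := fun hc => h (key.mp hc)
    have h1 : (a % k == i) = false := by simpa using h
    have h2 : ((a - i) % k == 0) = false := by simpa using hnd
    rw [h1, h2, Bool.and_false]

theorem break_ciphers_eq (cipher : String) (key_length : Int) :
    break_ciphers cipher key_length = break_ciphers_alt cipher key_length := by
  by_cases hk : 0 < key_length
  · set cs := cipher.toList with hcs
    set k := key_length with hkl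
    set rng := PySem.List.pyRange 0 k 1 with hrng
    have hmem : ∀ i ∈ rng, 0 ≤ i ∧ i < k := by
      intro i hi
      exact (PySem.List.mem_pyRange_one).mp (hrng ▸ hi)
    -- A's items
    have hA : break_ciphers cipher key_length
        = rng.map (fun i => (i, String.ofList (gatherA cs k i (cs.length + 1)))) := by
      rw [break_ciphers]
      rw [show (fun (d : PySem.Dict Int String) i =>
            d.insert i (String.ofList (gatherA cipher.toList key_length i (cipher.toList.length + 1))))
          = (fun d a => d.insert (id a)
            ((fun i => String.ofList (gatherA cs k i (cs.length + 1))) a)) from rfl]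
      rw [PySem.Dict.items_foldl_insert_fresh rng id _ PySem.Dict.empty
        (fun a _ => by simp [PySem.Dict.contains_empty]) (by simpa using PySem.List.nodup_pyRange_one 0 k)]
      simp [PySem.Dict.empty]
    -- B's buckets0
    have hB0items : ((PySem.List.pyRange 0 key_length 1).foldl
        (fun (d : PySem.Dict Int (List Char)) i => d.insert i []) PySem.Dict.empty).items
        = rng.map (fun i => (i, ([] : List Char))) := by
      rw [show (fun (d : PySem.Dict Int (List Char)) i => d.insert i ([] : List Char))
          = (fun d a => d.insert (id a) ((fun _ => ([] : List Char)) a)) from rfl]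
      rw [PySem.Dict.items_foldl_insert_fresh rng id _ PySem.Dict.empty
        (fun a _ => by simp [PySem.Dict.contains_empty]) (by simpa using PySem.List.nodup_pyRange_one 0 k)]
      simp [PySem.Dict.empty]
    set b0 : PySem.Dict Int (List Char) :=
      (PySem.List.pyRange 0 key_length 1).foldl (fun d i => d.insert i []) PySem.Dict.empty with hb0
    have hB0keys : b0.keys = rng := by
      rw [PySem.Dict.keys, hB0items, List.map_map]
      exact congrFun List.map_id_fun rng
    set bk : PySem.Dict Int (List Char) :=
      (PySem.List.enumerate cs 0).foldl
        (fun d p => d.modify (PySem.Int.mod p.1 k) [] (· ++ [p.2])) b0 with hbk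
    have hkeys : bk.keys = rng := by
      rw [hbk, PySem.Dict.keys_foldl_modify_key (PySem.List.enumerate cs 0)
        (fun p => PySem.Int.mod p.1 k) [] (fun _ p => (· ++ [p.2])) b0, hB0keys]
      apply set_update_of_subset
      intro x hx
      obtain ⟨p, _, rfl⟩ := List.mem_map.mp hx
      rw [hrng, PySem.List.mem_pyRange_one]
      exact ⟨PySem.Int.mod_nonneg p.1 hk, PySem.Int.mod_lt p.1 hk⟩
    have hnodup : bk.keys.Nodup := by
      rw [hkeys, hrng]; exact PySem.List.nodup_pyRange_one 0 k
    have hgetD : ∀ i ∈ rng, bk.getD i []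
        = ((PySem.List.enumerate cs 0).filter
            (fun p => PySem.Int.mod p.1 k == i)).map (·.2) := by
      intro i hi
      have hfold : bk = ((PySem.List.enumerate cs 0).map
          (fun p => (PySem.Int.mod p.1 k, p.2))).foldl
          (fun d p => d.modify p.1 [] (· ++ [p.2])) b0 := by
        rw [hbk, List.foldl_map]
      rw [hfold, PySem.Dict.getD_foldl_modify_append]
      have hb0get : b0.getD i [] = [] := by
        apply PySem.Dict.getD_of_mem_items b0 (v := ([] : List Char))
        · rw [hB0items]
          exact List.mem_map.mpr ⟨i, hi, rfl⟩
        · rw [hB0keys, hrng]; exact PySem.List.nodup_pyRange_one 0 k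
      rw [hb0get, List.nil_append, List.filter_map, List.map_map]
      rfl
    -- assemble
    rw [hA, break_ciphers_alt]
    simp only [← hcs, if_pos hk]
    rw [PySem.Dict.items_eq_map_keys bk hnodup [], hkeys, List.map_map]
    apply List.map_congr_left
    intro i hi
    obtain ⟨hi0, hik⟩ := hmem i hi
    simp only [Function.comp]
    congr 1
    rw [hgetD i hi]
    rw [gather_eq k hk cs (cs.length + 1) i hi0 (by push_cast; omega)]
    refine congrArg String.ofList (congrArg (List.map (fun x : Int × Char => x.2)) (List.filter_congr ?_))
    intro p hp
    obtain ⟨j, hj, rfl⟩ := (PySem.List.mem_enumerate_iff cs 0 p).mp hp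
    exact (mod_pred_iff k i (0 + (j : Int)) hk hi0 hik (by positivity)).symm
  · -- key_length ≤ 0 : the range is empty on both sides
    rw [break_ciphers, break_ciphers_alt]
    rw [PySem.List.pyRange_one_eq_nil (by omega : key_length ≤ 0)]
    simp [hk, PySem.Dict.empty]

-- ===== VERDICT (by name: the statement is the Claim_ definition above) =====
theorem break_ciphers_spec : Claim_equal_break_ciphers := by
  intro cipher key_length _
  unfold Spec_break_ciphers
  exact break_ciphers_eq cipher key_length
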